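-- pv_equiv track=rewrite | github.com/gaurav3di/fluxscan | sample_screeners.py | get_screener_category
-- ===== SOURCE A (Python) =====
-- def get_screener_category(screener_id):
--     """Categorize screeners"""
--     categories = {
--         "momentum": ["momentum_breakout"],
--         "mean_reversion": ["bollinger_squeeze"],
--         "trend": ["supertrend_signal"],
--         "volatility": ["volatility_breakout"],
--         "volume": ["volume_price_trend"],
--         "patterns": ["candlestick_patterns"],
--         "multi_indicator": ["triple_confirmation"],
--         "fibonacci": ["fibonacci_retracement"],
--         "structure": ["support_resistance"]
--     }
--
--     for category, screeners in categories.items():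
--         if screener_id in screeners:
--             return category
--     return "other"
-- ===== SOURCE B (Python) =====
-- _CATEGORY_BY_SCREENER = {
--     "momentum_breakout": "momentum",
--     "bollinger_squeeze": "mean_reversion",
--     "supertrend_signal": "trend",
--     "volatility_breakout": "volatility",
--     "volume_price_trend": "volume",
--     "candlestick_patterns": "patterns",
--     "triple_confirmation": "multi_indicator",
--     "fibonacci_retracement": "fibonacci",
--     "support_resistance": "structure",
-- }
--
-- def get_screener_category(screener_id):
--     """Categorize screeners"""
--     return _CATEGORY_BY_SCREENER.get(screener_id, "other")
-- ===== Notes on version B (the rewrite author's own statement) =====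
-- stated objective: idiomatic
-- what changed: Replaced the loop over category-to-screener-list pairs with a precomputed inverted flat dict mapping each screener id directly to its category, so the body is a single dict .get with the same default fallback and no loop or membership scans.
import Mathlib
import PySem

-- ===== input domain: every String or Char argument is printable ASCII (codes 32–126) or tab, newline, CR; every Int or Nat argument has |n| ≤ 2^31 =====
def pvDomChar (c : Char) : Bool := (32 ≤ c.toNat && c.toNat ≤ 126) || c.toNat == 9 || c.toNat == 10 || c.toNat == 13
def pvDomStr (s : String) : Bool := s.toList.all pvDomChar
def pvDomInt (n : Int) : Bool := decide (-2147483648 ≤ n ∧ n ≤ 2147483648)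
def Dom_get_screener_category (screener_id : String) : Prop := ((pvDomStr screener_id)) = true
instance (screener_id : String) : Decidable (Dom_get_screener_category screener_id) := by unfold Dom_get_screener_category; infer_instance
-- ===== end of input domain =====

-- B replaces A's loop over category→screener-list pairs by a single lookup in a
-- precomputed inverted flat dict (screener → category) with the same default fallback (idiomatic).


-- ===== PORT A =====
-- the `for category, screeners in categories.items(): if screener_id in screeners: return category` loop
def pvCatLoop (screener_id : String) : List (String × List String) → String
  | [] => "other"
  | (category, screeners) :: rest =>
      if screener_id ∈ screeners then category else pvCatLoop screener_id rest

def get_screener_category (screener_id : String) : String :=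
  let categories : List (String × List String) :=
    [ ("momentum", ["momentum_breakout"]),
      ("mean_reversion", ["bollinger_squeeze"]),
      ("trend", ["supertrend_signal"]),
      ("volatility", ["volatility_breakout"]),
      ("volume", ["volume_price_trend"]),
      ("patterns", ["candlestick_patterns"]),
      ("multi_indicator", ["triple_confirmation"]),
      ("fibonacci", ["fibonacci_retracement"]),
      ("structure", ["support_resistance"]) ]
  pvCatLoop screener_id categories

-- ===== PORT B =====
def pvCategoryBy : PySem.Dict String String :=
  PySem.Dict.ofList
    [ ("momentum_breakout", "momentum"),
      ("bollinger_squeeze", "mean_reversion"),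
      ("supertrend_signal", "trend"),
      ("volatility_breakout", "volatility"),
      ("volume_price_trend", "volume"),
      ("candlestick_patterns", "patterns"),
      ("triple_confirmation", "multi_indicator"),
      ("fibonacci_retracement", "fibonacci"),
      ("support_resistance", "structure") ]

def get_screener_category_alt (screener_id : String) : String :=
  pvCategoryBy.getD screener_id "other"

-- ===== PRECONDITION & SPEC =====
def Spec_get_screener_category (screener_id : String) (out : String) : Prop := out = get_screener_category_alt screener_id
instance (screener_id : String) (out : String) : Decidable (Spec_get_screener_category screener_id out) := by unfold Spec_get_screener_category; infer_instance

-- ===== CLAIM (what is proved, stated in full; the proofs are below) =====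
def Claim_equal_get_screener_category : Prop := ∀ (screener_id : String), Dom_get_screener_category screener_id → Spec_get_screener_category screener_id (get_screener_category screener_id)

-- ===== LEMMAS AND PROOFS =====

-- ===== VERDICT (by name: the statement is the Claim_ definition above) =====
theorem get_screener_category_spec : Claim_equal_get_screener_category := by
  intro s _
  unfold Spec_get_screener_category get_screener_category get_screener_category_alt pvCategoryBy
  simp only [pvCatLoop, PySem.Dict.ofList, PySem.Dict.update, PySem.Dict.getD_insert,
    PySem.Dict.getD_empty, List.foldl, List.mem_singleton]
  split_ifs <;> simp_all
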